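-- pv_equiv track=rewrite | github.com/asharanees/Tokemizer-Project | backend/services/optimizer/structural.py | _common_suffix_len
-- ===== SOURCE A (Python) =====
-- from typing import Callable, List, Optional, Sequence, Tuple
--
-- def _common_suffix_len(tokens: Sequence[Sequence[str]]) -> int:
--     if not tokens:
--         return 0
--     min_len = min(len(seq) for seq in tokens)
--     length = 0
--     for idx in range(1, min_len + 1):
--         token = tokens[0][-idx]
--         if all(seq[-idx] == token for seq in tokens[1:]):
--             length += 1
--         else:
--             break
--     return length
-- ===== SOURCE B (Python) =====
-- def _lcp_prefix(xs, ys):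
--     n = 0
--     for x, y in zip(xs, ys):
--         if x != y:
--             break
--         n += 1
--     return xs[:n]
--
--
-- def _common_suffix_len(tokens):
--     if not tokens:
--         return 0
--     acc = list(reversed(tokens[0]))
--     for seq in tokens[1:]:
--         acc = _lcp_prefix(acc, list(reversed(seq)))
--     return len(acc)
-- ===== Notes on version B (the rewrite author's own statement) =====
-- stated objective: alternative
-- what changed: B folds pairwise over the sequences, maintaining the running common reversed-prefix list, instead of A's column-wise index loop with negative indexing over a precomputed min length.
import Mathlib
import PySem

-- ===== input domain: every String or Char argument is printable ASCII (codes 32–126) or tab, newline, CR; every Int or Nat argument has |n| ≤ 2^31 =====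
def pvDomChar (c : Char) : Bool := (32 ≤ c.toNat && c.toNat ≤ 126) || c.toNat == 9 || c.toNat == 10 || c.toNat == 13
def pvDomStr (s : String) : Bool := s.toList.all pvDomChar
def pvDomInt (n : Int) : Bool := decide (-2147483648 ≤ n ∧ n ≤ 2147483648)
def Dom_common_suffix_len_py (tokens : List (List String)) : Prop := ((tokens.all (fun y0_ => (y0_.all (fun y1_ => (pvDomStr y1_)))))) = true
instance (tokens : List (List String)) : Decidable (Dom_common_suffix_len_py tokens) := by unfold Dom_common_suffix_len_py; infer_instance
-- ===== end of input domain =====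

-- B replaces A's column-wise loop (negative indexing up to the min length) by a fold over the
-- sequences that maintains the running common reversed-prefix list: an alternative decomposition,
-- same asymptotic cost. Both programs are total; return values only, no mutation.

-- ===== PORT A =====
-- the 'for idx in range(1, min_len + 1)' loop with its break, as structural recursion on the index
def csGo (tokens : List (List String)) (idx stop : Nat) (length : Int) : Int :=
  if idx > stop then length
  else
    let token := (PySem.List.pyGet? ((PySem.List.pyGet? tokens 0).getD []) (-(idx : Int))).getD ""
    if (PySem.List.slice tokens (some 1) none).all
        (fun seq => (PySem.List.pyGet? seq (-(idx : Int))).getD "" == token)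
    then csGo tokens (idx + 1) stop (length + 1)
    else length
termination_by stop + 1 - idx

def common_suffix_len_py (tokens : List (List String)) : Int :=
  if tokens.isEmpty then 0
  else
    match PySem.List.min? (tokens.map (fun seq => (seq.length : Int))) (fun x => x) with
    | none => 0
    | some min_len => csGo tokens 1 min_len.toNat 0

-- ===== PORT B =====
-- the zip loop of _lcp_prefix counting matching leading pairs
def lcpLen : List String → List String → Nat
  | x :: xs, y :: ys => if x ≠ y then 0 else lcpLen xs ys + 1
  | _, _ => 0

-- _lcp_prefix: count matching leading pairs, then slice
def lcpPrefix (xs ys : List String) : List String := xs.take (lcpLen xs ys)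

def common_suffix_len_py_alt (tokens : List (List String)) : Int :=
  match tokens with
  | [] => 0
  | t :: rest =>
    ((rest.foldl (fun acc seq => lcpPrefix acc seq.reverse) t.reverse).length : Int)

-- ===== PRECONDITION & SPEC =====
def Spec_common_suffix_len_py (tokens : List (List String)) (out : Int) : Prop := out = common_suffix_len_py_alt tokens
instance (tokens : List (List String)) (out : Int) : Decidable (Spec_common_suffix_len_py tokens out) := by unfold Spec_common_suffix_len_py; infer_instance

-- ===== CLAIM (what is proved, stated in full; the proofs are below) =====
def Claim_equal_common_suffix_len_py : Prop := ∀ (tokens : List (List String)), Dom_common_suffix_len_py tokens → Spec_common_suffix_len_py tokens (common_suffix_len_py tokens)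

-- ===== LEMMAS AND PROOFS =====

theorem lcpLen_le_right (xs ys : List String) : lcpLen xs ys ≤ ys.length := by
  induction xs generalizing ys with
  | nil => simp [lcpLen]
  | cons x xs ih =>
    cases ys with
    | nil => simp [lcpLen]
    | cons y ys =>
      simp only [lcpLen]
      split
      · omega
      · have := ih ys; simp; omega

theorem lcpLen_take_left (xs ys : List String) (k : Nat) :
    lcpLen (xs.take k) ys = min k (lcpLen xs ys) := by
  induction xs generalizing ys k with
  | nil => simp [lcpLen]
  | cons x xs ih =>
    cases k with
    | zero => cases ys <;> simp [lcpLen]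
    | succ k =>
      cases ys with
      | nil => simp [lcpLen]
      | cons y ys =>
        simp only [List.take_succ_cons, lcpLen]
        split
        · simp
        · rw [ih]; omega

-- given agreement up to i, agreement at i decides whether lcpLen exceeds i
theorem lcpLen_lt_iff (xs ys : List String) (i : Nat)
    (h : i ≤ lcpLen xs ys) (hx : i < xs.length) (hy : i < ys.length) :
    (i < lcpLen xs ys ↔ xs[i]? = ys[i]?) := by
  induction i generalizing xs ys with
  | zero =>
    cases xs with
    | nil => simp at hx
    | cons x xs =>
      cases ys with
      | nil => simp at hy
      | cons y ys =>
        simp only [lcpLen, List.getElem?_cons_zero]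
        split <;> rename_i hxy
        · simp [hxy]
        · simp at hxy; simp [hxy]
  | succ i ih =>
    cases xs with
    | nil => simp at hx
    | cons x xs =>
      cases ys with
      | nil => simp at hy
      | cons y ys =>
        simp only [lcpLen] at h ⊢
        split at h <;> rename_i hxy
        · omega
        · simp only [if_neg hxy, List.getElem?_cons_succ]
          constructor
          · intro hlt; exact (ih xs ys (by omega) (by simpa using hx) (by simpa using hy)).mp (by omega)
          · intro he
            have := (ih xs ys (by omega) (by simpa using hx) (by simpa using hy)).mpr he
            omega

theorem le_foldl_min (l : List (List String)) (g : List String → Nat) (n0 k : Nat) :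
    k ≤ l.foldl (fun n s => min n (g s)) n0 ↔ k ≤ n0 ∧ ∀ s ∈ l, k ≤ g s := by
  induction l generalizing n0 with
  | nil => simp
  | cons s l ih =>
    rw [List.foldl_cons, ih]
    simp only [List.mem_cons]
    constructor
    · rintro ⟨h1, h2⟩
      refine ⟨by omega, ?_⟩
      rintro x (rfl | hx)
      · omega
      · exact h2 x hx
    · rintro ⟨h1, h2⟩
      refine ⟨?_, fun x hx => h2 x (Or.inr hx)⟩
      have := h2 s (Or.inl rfl)
      omega

theorem foldl_min_mono (l : List (List String)) (g g' : List String → Nat) (n0 : Nat)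
    (h : ∀ s ∈ l, g s ≤ g' s) :
    l.foldl (fun n s => min n (g s)) n0 ≤ l.foldl (fun n s => min n (g' s)) n0 := by
  induction l generalizing n0 with
  | nil => simp
  | cons s l ih =>
    simp only [List.foldl_cons]
    calc l.foldl (fun n s => min n (g s)) (min n0 (g s))
        ≤ l.foldl (fun n s => min n (g s)) (min n0 (g' s)) := by
          have hg := h s (by simp)
          have hmono : ∀ (l : List (List String)) (a b : Nat), a ≤ b →
              l.foldl (fun n s => min n (g s)) a ≤ l.foldl (fun n s => min n (g s)) b := by
            intro l; induction l with
            | nil => simp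
            | cons t l ih2 => intro a b hab; simp only [List.foldl_cons]; exact ih2 _ _ (by omega)
          exact hmono l _ _ (by omega)
      _ ≤ l.foldl (fun n s => min n (g' s)) (min n0 (g' s)) := ih _ (fun x hx => h x (by simp [hx]))

theorem foldl_min_le_init (l : List (List String)) (g : List String → Nat) (n0 : Nat) :
    l.foldl (fun n s => min n (g s)) n0 ≤ n0 := by
  induction l generalizing n0 with
  | nil => simp
  | cons s l ih => simpa using le_trans (ih (min n0 (g s))) (by omega)

-- the value both programs compute
def Mval (t : List String) (rest : List (List String)) : Nat :=
  rest.foldl (fun n s => min n (lcpLen t.reverse s.reverse)) t.length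

-- B's fold, characterised
theorem foldB (a : List String) (l : List (List String)) (k : Nat) (hk : k ≤ a.length) :
    l.foldl (fun acc seq => lcpPrefix acc seq.reverse) (a.take k)
      = a.take (l.foldl (fun n s => min n (lcpLen a s.reverse)) k) := by
  induction l generalizing k with
  | nil => simp
  | cons s l ih =>
    rw [List.foldl_cons]
    have hstep : lcpPrefix (a.take k) s.reverse = a.take (min k (lcpLen a s.reverse)) := by
      simp only [lcpPrefix]
      rw [lcpLen_take_left, List.take_take]
      congr 1
      omega
    rw [hstep, ih _ (by omega), List.foldl_cons]

theorem alt_eq_Mval (t : List String) (rest : List (List String)) :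
    common_suffix_len_py_alt (t :: rest) = (Mval t rest : Int) := by
  have h := foldB t.reverse rest t.reverse.length (le_refl _)
  rw [List.take_length] at h
  simp only [List.length_reverse] at h
  simp only [common_suffix_len_py_alt, h, List.length_take, List.length_reverse, Mval]
  have hle := foldl_min_le_init rest (fun s => lcpLen t.reverse s.reverse) t.length
  omega

-- negative-index access equals access into the reverse
theorem pyGet_neg_reverse (s : List String) (idx : Nat) (h1 : 1 ≤ idx) (h2 : idx ≤ s.length) :
    (PySem.List.pyGet? s (-(idx : Int))).getD "" = (s.reverse[idx - 1]?).getD "" := by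
  rw [PySem.List.pyGet?_neg_natCast s idx (by omega) h2]
  have hlt : idx - 1 < s.length := by omega
  rw [List.getElem?_reverse hlt]
  have he : s.length - 1 - (idx - 1) = s.length - idx := by omega
  rw [he]

-- A's loop, characterised
theorem goEq (t : List String) (rest : List (List String)) (stop idx : Nat) (len : Int)
    (hst : stop ≤ t.length) (hsr : ∀ s ∈ rest, stop ≤ s.length)
    (h1 : 1 ≤ idx) (h2 : idx ≤ stop + 1) (hM : idx - 1 ≤ Mval t rest) :
    csGo (t :: rest) idx stop len = len + ((min (Mval t rest) stop - (idx - 1) : Nat) : Int) := by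
  generalize hd : stop + 1 - idx = d
  induction d generalizing idx len with
  | zero =>
    rw [csGo]
    have : idx > stop := by omega
    rw [if_pos this]
    have : min (Mval t rest) stop = stop := by omega
    rw [this]
    have : stop - (idx - 1) = 0 := by omega
    simp [this]
  | succ d ih =>
    have hidx : idx ≤ stop := by omega
    rw [csGo, if_neg (by omega)]
    have htok : (PySem.List.pyGet? ((t :: rest) : List (List String)) (0 : Int)).getD [] = t := by
      rw [PySem.List.pyGet?_zero_cons]
      rfl
    have hslice : PySem.List.slice ((t :: rest) : List (List String)) (some 1) none = rest := by
      simpa using PySem.List.slice_from_one (t :: rest)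
    rw [htok, hslice]
    -- the loop condition decides whether idx ≤ Mval
    have hMchar : ∀ i : Nat, (i ≤ Mval t rest ↔ i ≤ t.length ∧
        ∀ s ∈ rest, i ≤ lcpLen t.reverse s.reverse) := by
      intro i
      simpa [Mval] using le_foldl_min rest (fun s => lcpLen t.reverse s.reverse) t.length i
    have hprev := (hMchar (idx - 1)).mp hM
    have hcond : (rest.all (fun seq =>
        (PySem.List.pyGet? seq (-(idx : Int))).getD "" ==
          (PySem.List.pyGet? t (-(idx : Int))).getD "")) = true ↔ idx ≤ Mval t rest := by
      rw [List.all_eq_true]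
      constructor
      · intro hall
        refine (hMchar idx).mpr ⟨by omega, fun s hs => ?_⟩
        have hlen : idx ≤ s.length := le_trans hidx (hsr s hs)
        have heq := hall s hs
        rw [beq_iff_eq, pyGet_neg_reverse s idx h1 hlen,
            pyGet_neg_reverse t idx h1 (by omega)] at heq
        have hx : idx - 1 < t.reverse.length := by simp; omega
        have hy : idx - 1 < s.reverse.length := by simp; omega
        have hgx : t.reverse[idx-1]? = some t.reverse[idx-1] := List.getElem?_eq_getElem hx
        have hgy : s.reverse[idx-1]? = some s.reverse[idx-1] := List.getElem?_eq_getElem hy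
        have hlt := (lcpLen_lt_iff t.reverse s.reverse (idx - 1)
          (hprev.2 s hs) hx hy).mpr
        have : t.reverse[idx-1]? = s.reverse[idx-1]? := by
          rw [hgx, hgy]
          rw [hgx, hgy] at heq
          simpa using heq.symm
        have := hlt this
        omega
      · intro hMidx s hs
        have hall := ((hMchar idx).mp hMidx).2 s hs
        have hlen : idx ≤ s.length := le_trans hidx (hsr s hs)
        have hx : idx - 1 < t.reverse.length := by simp; omega
        have hy : idx - 1 < s.reverse.length := by simp; omega
        have heq := (lcpLen_lt_iff t.reverse s.reverse (idx - 1)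
          (by omega) hx hy).mp (by omega)
        rw [beq_iff_eq, pyGet_neg_reverse s idx h1 hlen,
            pyGet_neg_reverse t idx h1 (by omega), heq]
    by_cases hc : idx ≤ Mval t rest
    · rw [if_pos (by rw [hcond]; exact hc)]
      rw [ih (idx + 1) (len + 1) (by omega) (by omega) (by simpa using hc) (by omega)]
      have hmin : idx ≤ min (Mval t rest) stop := by omega
      have e1 : min (Mval t rest) stop - (idx + 1 - 1) + 1 = min (Mval t rest) stop - (idx - 1) := by
        omega
      push_cast [← e1]
      ring
    · rw [if_neg (by rw [hcond]; exact hc)]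
      have : min (Mval t rest) stop = idx - 1 := by omega
      rw [this]
      simp

-- minimum-of-lengths: the Int fold in the port equals the Nat fold
theorem minLen_cast (t : List String) (rest : List (List String)) :
    (rest.map (fun s => (s.length : Int))).foldl min (t.length : Int)
      = ((rest.foldl (fun n s => min n s.length) t.length : Nat) : Int) := by
  induction rest generalizing t with
  | nil => simp
  | cons s rest ih =>
    simp only [List.map_cons, List.foldl_cons]
    have : min (t.length : Int) (s.length : Int) = ((min t.length s.length : Nat) : Int) := by
      omega
    rw [this]
    have := ih (t.take (min t.length s.length))
    simpa using this

theorem minLen_ge (t : List String) (rest : List (List String)) :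
    Mval t rest ≤ rest.foldl (fun n s => min n s.length) t.length := by
  unfold Mval
  exact foldl_min_mono rest _ _ t.length (fun s _ => by
    simpa using lcpLen_le_right t.reverse s.reverse)

theorem minLen_bounds (rest : List (List String)) (n0 : Nat) :
    rest.foldl (fun n s => min n s.length) n0 ≤ n0 ∧
      ∀ s ∈ rest, rest.foldl (fun n s => min n s.length) n0 ≤ s.length := by
  constructor
  · exact foldl_min_le_init rest _ n0
  · intro s hs
    exact ((le_foldl_min rest _ n0 _).mp (le_refl _)).2 s hs

-- ===== VERDICT (by name: the statement is the Claim_ definition above) =====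
theorem common_suffix_len_py_spec : Claim_equal_common_suffix_len_py := by
  intro tokens _
  unfold Spec_common_suffix_len_py
  cases tokens with
  | nil => rfl
  | cons t rest =>
    unfold common_suffix_len_py
    rw [if_neg (by simp)]
    rw [List.map_cons, PySem.List.min?_id_cons, minLen_cast]
    simp only [Int.toNat_natCast]
    set L := rest.foldl (fun n s => min n s.length) t.length with hL
    obtain ⟨hb1, hb2⟩ := minLen_bounds rest t.length
    rw [goEq t rest L 1 0 hb1 hb2 (le_refl _) (by omega) (by omega)]
    have hge := minLen_ge t rest
    have : min (Mval t rest) L = Mval t rest := by omega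
    rw [alt_eq_Mval]
    simp [this]
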